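-- pv_equiv track=rewrite | github.com/LunarWatcher/NN-chatbot | Commands.py | fixedFormat
-- ===== SOURCE A (Python) =====
-- def fixedFormat(stringToFormat: str, isDiscord: bool):
--     result = ""
--     if not isDiscord:
--         for line in stringToFormat.split("\n"):
--             result += ''.join([" " for i in range(4)]) + line + "\n"
--     else:
--         result += "```"
--         result += stringToFormat
--         result += "```"
--     return result
-- ===== SOURCE B (Python) =====
-- def fixedFormat(stringToFormat: str, isDiscord: bool):
--     if isDiscord:
--         return "```" + stringToFormat + "```"
--     return "    " + stringToFormat.replace("\n", "\n    ") + "\n"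
-- ===== Notes on version B (the rewrite author's own statement) =====
-- stated objective: idiomatic
-- what changed: replaced the per-line split-and-accumulate loop with a single string substitution (' ' + s.replace('\n', '\n ') + '\n') for the indent branch
import Mathlib
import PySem

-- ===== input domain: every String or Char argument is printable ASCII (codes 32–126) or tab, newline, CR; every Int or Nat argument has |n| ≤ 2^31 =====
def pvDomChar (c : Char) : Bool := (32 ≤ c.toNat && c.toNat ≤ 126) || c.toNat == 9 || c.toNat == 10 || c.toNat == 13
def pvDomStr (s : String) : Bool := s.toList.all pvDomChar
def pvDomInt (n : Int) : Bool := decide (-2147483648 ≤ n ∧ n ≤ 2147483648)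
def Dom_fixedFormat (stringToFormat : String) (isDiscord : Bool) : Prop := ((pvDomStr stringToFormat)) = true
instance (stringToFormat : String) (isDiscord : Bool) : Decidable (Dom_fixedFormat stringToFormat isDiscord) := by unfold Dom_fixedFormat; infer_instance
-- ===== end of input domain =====

-- B replaces A's per-line split/accumulate loop by one substitution (more idiomatic); same values everywhere.

-- ===== PORT A =====
-- A: result = ""; for line in s.split("\n"): result += ''.join(" " for 4) + line + "\n"; else branch wraps in ```
def fixedFormat (stringToFormat : String) (isDiscord : Bool) : String :=
  if !isDiscord then
    String.ofList ((PySem.Chars.splitOn stringToFormat.toList ['\n']).foldl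
      (fun result line =>
        result ++ PySem.Chars.join [] ((PySem.List.pyRange 0 4 1).map (fun _ => [' '])) ++ line ++ ['\n']) [])
  else
    String.ofList (([] ++ ['`','`','`']) ++ stringToFormat.toList ++ ['`','`','`'])

-- ===== PORT B =====
-- B: "```"+s+"```" if discord else "    " + s.replace("\n", "\n    ") + "\n"
def fixedFormat_alt (stringToFormat : String) (isDiscord : Bool) : String :=
  if isDiscord then
    String.ofList (['`','`','`'] ++ stringToFormat.toList ++ ['`','`','`'])
  else
    String.ofList ([' ',' ',' ',' '] ++
      PySem.Chars.replace stringToFormat.toList ['\n'] ['\n',' ',' ',' ',' '] ++ ['\n'])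

-- ===== PRECONDITION & SPEC =====
def Spec_fixedFormat (stringToFormat : String) (isDiscord : Bool) (out : String) : Prop := out = fixedFormat_alt stringToFormat isDiscord
instance (stringToFormat : String) (isDiscord : Bool) (out : String) : Decidable (Spec_fixedFormat stringToFormat isDiscord out) := by unfold Spec_fixedFormat; infer_instance

-- ===== CLAIM (what is proved, stated in full; the proofs are below) =====
def Claim_equal_fixedFormat : Prop := ∀ (stringToFormat : String) (isDiscord : Bool), Dom_fixedFormat stringToFormat isDiscord → Spec_fixedFormat stringToFormat isDiscord (fixedFormat stringToFormat isDiscord)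

-- ===== LEMMAS AND PROOFS =====

/-- Proof-side model of `replace cs ['\n'] ['\n',' ',' ',' ',' ']`. -/
def pvRep : List Char → List Char
  | [] => []
  | c :: t => if c = '\n' then '\n' :: ' ' :: ' ' :: ' ' :: ' ' :: pvRep t else c :: pvRep t

/-- Proof-side model of `splitOn cs ['\n']` with an accumulated current piece. -/
def pvParts (pre : List Char) : List Char → List (List Char)
  | [] => [pre]
  | c :: t => if c = '\n' then pre :: pvParts [] t else pvParts (pre ++ [c]) t

theorem pvReplace_go (fuel : Nat) (l acc : List Char) (h : l.length ≤ fuel) :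
    PySem.Chars.replace.go ['\n'] ['\n',' ',' ',' ',' '] fuel l acc = acc.reverse ++ pvRep l := by
  induction fuel generalizing l acc with
  | zero =>
    have : l = [] := by cases l <;> simp_all
    subst this; simp [PySem.Chars.replace.go, pvRep]
  | succ n ih =>
    cases l with
    | nil => simp [PySem.Chars.replace.go, pvRep]
    | cons c t =>
      simp only [PySem.Chars.replace.go]
      by_cases hc : c = '\n'
      · subst hc
        simp only [List.isPrefixOf, List.length] at *
        rw [if_pos (by simp)]
        simp only [List.drop_succ_cons, List.drop_zero, Nat.zero_add]
        rw [ih t _ (by simpa using Nat.le_of_succ_le_succ h)]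
        simp [pvRep]
      · rw [if_neg (by simp [List.isPrefixOf]; exact fun e => hc e.symm)]
        rw [ih t _ (by simpa using Nat.le_of_succ_le_succ h)]
        simp [pvRep, hc]

theorem pvSplit_go (fuel : Nat) (l cur : List Char) (acc : List (List Char)) (h : l.length < fuel) :
    PySem.Chars.splitOn.go ['\n'] fuel l cur acc = acc.reverse ++ pvParts cur.reverse l := by
  induction fuel generalizing l cur acc with
  | zero => omega
  | succ n ih =>
    cases l with
    | nil => simp [PySem.Chars.splitOn.go, pvParts]
    | cons c t =>
      simp only [PySem.Chars.splitOn.go]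
      by_cases hc : c = '\n'
      · subst hc
        rw [if_pos (by simp)]
        simp only [List.length_cons, List.length_nil, List.drop_succ_cons, List.drop_zero, Nat.zero_add]
        rw [ih t [] _ (by simpa using Nat.lt_of_succ_lt_succ h)]
        simp [pvParts]
      · rw [if_neg (by simp [List.isPrefixOf]; exact fun e => hc e.symm)]
        rw [ih t (c :: cur) acc (by simpa using Nat.lt_of_succ_lt_succ h)]
        simp [pvParts, hc]

theorem pvFoldl_parts (l pre acc : List Char) :
    (pvParts pre l).foldl
      (fun result line => result ++ [' ',' ',' ',' '] ++ line ++ ['\n']) acc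
    = acc ++ [' ',' ',' ',' '] ++ pre ++ pvRep l ++ ['\n'] := by
  induction l generalizing pre acc with
  | nil => simp [pvParts, pvRep]
  | cons c t ih =>
    by_cases hc : c = '\n'
    · subst hc
      rw [show pvParts pre ('\n' :: t) = pre :: pvParts [] t from by simp [pvParts]]
      simp only [List.foldl]
      rw [ih]
      simp [pvRep]
    · simp only [pvParts, if_neg hc]
      rw [ih]
      simp [pvRep, hc]

theorem pvJoin4 :
    PySem.Chars.join [] ((PySem.List.pyRange 0 4 1).map (fun _ => [' '])) = [' ',' ',' ',' '] := by
  decide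

-- ===== VERDICT (by name: the statement is the Claim_ definition above) =====
theorem fixedFormat_spec : Claim_equal_fixedFormat := by
  intro s d _
  unfold Spec_fixedFormat fixedFormat fixedFormat_alt
  cases d with
  | true => simp
  | false =>
    simp only [Bool.not_false, if_pos, if_neg, Bool.false_eq_true, not_false_iff]
    congr 1
    rw [show (PySem.Chars.splitOn s.toList ['\n']) =
        PySem.Chars.splitOn.go ['\n'] (s.toList.length + 1) s.toList [] [] from rfl]
    rw [pvSplit_go _ _ _ _ (Nat.lt_succ_self _)]
    simp only [pvJoin4, List.reverse_nil, List.nil_append]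
    rw [pvFoldl_parts]
    rw [show PySem.Chars.replace s.toList ['\n'] ['\n',' ',' ',' ',' ']
        = PySem.Chars.replace.go ['\n'] ['\n',' ',' ',' ',' '] s.toList.length s.toList [] from by
      simp [PySem.Chars.replace]]
    rw [pvReplace_go _ _ _ (Nat.le_refl _)]
    simp
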